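-- pv_equiv track=rewrite | github.com/CryAndRRich/hustack | leetcode/binary_search/3323_Minimize_Connected_Groups_by_Inserting_Interval/codes/slide.py | minConnectedGroups
-- ===== SOURCE A (Python) =====
-- from typing import List
--
-- def minConnectedGroups(intervals: List[List[int]], k: int) -> int:
--     intervals.sort()
--     merged = []
--     for s, e in intervals:
--         if not merged or s > merged[-1][1]:
--             merged.append([s, e])
--         else:
--             if e > merged[-1][1]:
--                 merged[-1][1] = e
--     m = len(merged)
--     if m == 0:
--         return 0
--     j = 0
--     max_len = 1
--     for i in range(m):
--         if j < i:
--             j = i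
--         while j + 1 < m and merged[j + 1][0] - merged[i][1] <= k:
--             j += 1
--         cur = j - i + 1
--         if cur > max_len:
--             max_len = cur
--     return m - max_len + 1
-- ===== SOURCE B (Python) =====
-- from typing import List
--
-- def _bisect_right(a: List[int], x: int) -> int:
--     lo, hi = 0, len(a)
--     while lo < hi:
--         mid = (lo + hi) // 2
--         if x < a[mid]:
--             hi = mid
--         else:
--             lo = mid + 1
--     return lo
--
-- def minConnectedGroups(intervals: List[List[int]], k: int) -> int:
--     intervals.sort()
--     merged = []
--     for s, e in intervals:
--         if not merged or s > merged[-1][1]: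
--             merged.append([s, e])
--         elif e > merged[-1][1]:
--             merged[-1][1] = e
--     m = len(merged)
--     if m == 0:
--         return 0
--     starts = [iv[0] for iv in merged]
--     best = 1
--     for i, (_, e) in enumerate(merged):
--         j = _bisect_right(starts, e + k) - 1
--         best = max(best, j - i + 1)
--     return m - best + 1
-- ===== Notes on version B (the rewrite author's own statement) =====
-- stated objective: alternative
-- what changed: The stateful two-pointer sliding window over the merged intervals (a carried j advanced by an inner while loop) is replaced by an independent binary search per interval: for each merged interval, bisect_right on the sorted start list finds the farthest reachable interval directly.
import Mathlib
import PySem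

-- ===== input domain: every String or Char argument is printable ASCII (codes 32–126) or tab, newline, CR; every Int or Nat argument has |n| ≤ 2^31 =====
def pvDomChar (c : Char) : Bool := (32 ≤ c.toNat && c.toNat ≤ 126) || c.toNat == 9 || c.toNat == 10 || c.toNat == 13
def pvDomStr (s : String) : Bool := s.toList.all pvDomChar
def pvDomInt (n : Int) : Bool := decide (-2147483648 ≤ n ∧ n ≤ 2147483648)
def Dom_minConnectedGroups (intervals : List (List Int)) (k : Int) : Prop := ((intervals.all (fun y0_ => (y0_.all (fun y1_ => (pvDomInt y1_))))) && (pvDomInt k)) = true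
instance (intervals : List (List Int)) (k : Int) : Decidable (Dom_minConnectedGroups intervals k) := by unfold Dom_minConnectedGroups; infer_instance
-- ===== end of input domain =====

-- B replaces A's stateful two-pointer window with an independent binary search per merged
-- interval (objective: alternative). Both Pythons sort `intervals` in place (same side effect);
-- the equivalence proved here is about the return value.

-- ===== PORT A =====
-- shared sort-and-merge prefix: Source A and Source B contain this identical code verbatim.
-- `for s, e in intervals` unpacks length-2 lists (Pre_ guarantees this), ported as getD 0/getD 1;
-- `merged[-1][1] = e` (mutate the last end in place) is ported as dropLast ++ [(last.1, e)].
def pvMergeStep (merged : List (Int × Int)) (iv : List Int) : List (Int × Int) :=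
  let s := iv.getD 0 0
  let e := iv.getD 1 0
  if h : merged = [] then [(s, e)]
  else
    let last := merged.getLast h
    if s > last.2 then merged ++ [(s, e)]
    else if e > last.2 then merged.dropLast ++ [(last.1, e)]
    else merged

-- `intervals.sort()`: Python's lexicographic list order = the lexicographic LinearOrder on List Int
def pvSortMerge (intervals : List (List Int)) : List (Int × Int) :=
  (@PySem.List.sorted (List Int) (List Int) List.instLinearOrder.toLT LinearOrder.toDecidableLT
    intervals (fun x => x) false).foldl pvMergeStep []

-- A's inner `while j + 1 < m and merged[j+1][0] - merged[i][1] <= k: j += 1`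
def pvExtend (merged : List (Int × Int)) (e k j : Int) : Int :=
  if h : j + 1 < (merged.length : Int) then
    if (PySem.List.pyGetD merged (j + 1) (0, 0)).1 - e ≤ k then pvExtend merged e k (j + 1)
    else j
  else j
termination_by ((merged.length : Int) - j).toNat
decreasing_by omega

-- A's body of `for i in range(m)` with state (j, max_len)
def pvStepA (merged : List (Int × Int)) (k : Int) (st : Int × Int) (i : Int) : Int × Int :=
  let j0 := if st.1 < i then i else st.1
  let j := pvExtend merged (PySem.List.pyGetD merged i (0, 0)).2 k j0
  let cur := j - i + 1
  (j, if st.2 < cur then cur else st.2)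

def minConnectedGroups (intervals : List (List Int)) (k : Int) : Int :=
  let merged := pvSortMerge intervals
  let m : Int := merged.length
  if m = 0 then 0
  else
    let st := (PySem.List.pyRange 0 m 1).foldl (pvStepA merged k) (0, 1)
    m - st.2 + 1

-- ===== PORT B =====
-- B's loop body: `j = _bisect_right(starts, e + k) - 1; best = max(best, j - i + 1)`
-- (_bisect_right in Source B is verbatim the textbook bisect_right loop = PySem.List.bisectRight)
def pvStepB (starts : List Int) (k : Int) (best : Int) (p : Int × (Int × Int)) : Int :=
  let j := (PySem.List.bisectRight starts (p.2.2 + k) : Int) - 1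
  max best (j - p.1 + 1)

def minConnectedGroups_alt (intervals : List (List Int)) (k : Int) : Int :=
  let merged := pvSortMerge intervals
  let m : Int := merged.length
  if m = 0 then 0
  else
    let starts := merged.map (fun p => p.1)
    let best := (PySem.List.enumerate merged 0).foldl (pvStepB starts k) 1
    m - best + 1

-- ===== PRECONDITION & SPEC =====
-- Pre_ excludes exactly the inputs where Python A raises: `for s, e in intervals`
-- raises ValueError unless every inner list has exactly two elements.
def Pre_minConnectedGroups (intervals : List (List Int)) (k : Int) : Prop :=
  ∀ iv ∈ intervals, iv.length = 2
instance (intervals : List (List Int)) (k : Int) : Decidable (Pre_minConnectedGroups intervals k) := by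
  unfold Pre_minConnectedGroups; infer_instance

def pvWitness_minConnectedGroups : List (List Int) × Int := ([[1, 3], [5, 6]], 1)

def Spec_minConnectedGroups (intervals : List (List Int)) (k : Int) (out : Int) : Prop := out = minConnectedGroups_alt intervals k
instance (intervals : List (List Int)) (k : Int) (out : Int) : Decidable (Spec_minConnectedGroups intervals k out) := by unfold Spec_minConnectedGroups; infer_instance

-- ===== CLAIM (what is proved, stated in full; the proofs are below) =====
def Claim_equal_minConnectedGroups : Prop := ∀ (intervals : List (List Int)) (k : Int), Dom_minConnectedGroups intervals k → Pre_minConnectedGroups intervals k → Spec_minConnectedGroups intervals k (minConnectedGroups intervals k)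

-- ===== LEMMAS AND PROOFS =====

-- Python compares length-2 lists lexicographically, so `≤` bounds the first components.
lemma pvLexHead (a b : List Int) (ha : a.length = 2) (hb : b.length = 2)
    (h : @LE.le (List Int) List.instLinearOrder.toLE a b) : a.getD 0 0 ≤ b.getD 0 0 := by
  obtain ⟨x1, x2, rfl⟩ := List.length_eq_two.mp ha
  obtain ⟨y1, y2, rfl⟩ := List.length_eq_two.mp hb
  simp only [List.getD_cons_zero]
  by_contra hlt
  exact absurd (List.Lex.rel (show y1 < x1 by omega) :
    @LT.lt (List Int) List.instLinearOrder.toLT [y1, y2] [x1, x2]) (not_lt_of_ge h)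

-- every first component of the merged accumulator is an old one or the incoming start
lemma pvMergeStep_fst_sub (acc : List (Int × Int)) (iv : List Int) :
    ∀ x ∈ (pvMergeStep acc iv).map (fun p => p.1),
      x ∈ acc.map (fun p => p.1) ∨ x = iv.getD 0 0 := by
  intro x hx
  by_cases hnil : acc = []
  · simp [pvMergeStep, hnil] at hx
    right; exact hx
  · simp only [pvMergeStep, dif_neg hnil] at hx
    split_ifs at hx with h1 h2
    · rw [List.map_append] at hx
      rcases List.mem_append.mp hx with h | h
      · left; exact h
      · right; simpa using h
    · left
      rw [List.map_append] at hx
      rcases List.mem_append.mp hx with h | h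
      · exact List.map_subset _ (List.dropLast_subset acc) h
      · simp only [List.map_cons, List.map_nil, List.mem_singleton] at h
        subst h
        exact List.mem_map_of_mem (List.getLast_mem hnil)
    · left; exact hx

-- the merge step keeps the list of first components sorted
lemma pvMergeStep_fst_pairwise (acc : List (Int × Int)) (iv : List Int)
    (hacc : (acc.map (fun p => p.1)).Pairwise (· ≤ ·))
    (hle : ∀ p ∈ acc, p.1 ≤ iv.getD 0 0) :
    ((pvMergeStep acc iv).map (fun p => p.1)).Pairwise (· ≤ ·) := by
  by_cases hnil : acc = []
  · simp [pvMergeStep, hnil]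
  · simp only [pvMergeStep, dif_neg hnil]
    split_ifs with h1 h2
    · rw [List.map_append]
      refine List.pairwise_append.mpr ⟨hacc, by simp, ?_⟩
      intro x hx y hy
      obtain ⟨q, hq, rfl⟩ := List.mem_map.mp hx
      simp only [List.map_cons, List.map_nil, List.mem_singleton] at hy
      subst hy
      exact hle q hq
    · have heq : ((acc.dropLast ++ [((acc.getLast hnil).1, iv.getD 1 0)]).map (fun p => p.1))
          = acc.map (fun p => p.1) := by
        conv_rhs => rw [← List.dropLast_append_getLast hnil]
        simp
      rw [heq]; exact hacc
    · exact hacc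

lemma pvMerge_go (xs : List (List Int)) (acc : List (Int × Int))
    (hxs : xs.Pairwise (fun a b => a.getD 0 0 ≤ b.getD 0 0))
    (hacc : (acc.map (fun p => p.1)).Pairwise (· ≤ ·))
    (hcross : ∀ iv ∈ xs, ∀ p ∈ acc, p.1 ≤ iv.getD 0 0) :
    ((xs.foldl pvMergeStep acc).map (fun p => p.1)).Pairwise (· ≤ ·) := by
  induction xs generalizing acc with
  | nil => simpa using hacc
  | cons iv rest ih =>
    rw [List.foldl_cons]
    obtain ⟨hhead, htail⟩ := List.pairwise_cons.mp hxs
    refine ih _ htail ?_ ?_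
    · exact pvMergeStep_fst_pairwise acc iv hacc
        (fun p hp => hcross iv (List.mem_cons_self ..) p hp)
    · intro iv' hiv' p hp
      rcases pvMergeStep_fst_sub acc iv p.1 (List.mem_map_of_mem hp) with hmem | heq
      · obtain ⟨q, hq, hq1⟩ := List.mem_map.mp hmem
        exact hq1 ▸ hcross iv' (List.mem_cons_of_mem _ hiv') q hq
      · exact heq ▸ hhead iv' hiv'

lemma pvStarts_sorted (intervals : List (List Int))
    (hpre : ∀ iv ∈ intervals, iv.length = 2) :
    ((pvSortMerge intervals).map (fun p => p.1)).Pairwise (· ≤ ·) := by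
  unfold pvSortMerge
  refine pvMerge_go _ _ ?_ (by simp) (by simp)
  refine (PySem.List.sorted_pairwise intervals (fun x => x)).imp_of_mem ?_
  intro a b ha hb hle
  exact pvLexHead a b
    (hpre a ((@PySem.List.mem_sorted (List Int) (List Int) List.instLinearOrder.toLT
      LinearOrder.toDecidableLT _ _ _ _).mp ha))
    (hpre b ((@PySem.List.mem_sorted (List Int) (List Int) List.instLinearOrder.toLT
      LinearOrder.toDecidableLT _ _ _ _).mp hb)) hle

-- on a sorted start list, A's while-loop lands exactly on bisect_right - 1 (clamped below by j)
lemma pvExtend_eq (merged : List (Int × Int))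
    (hst : (merged.map (fun p => p.1)).Pairwise (· ≤ ·)) (e k : Int) :
    ∀ j : Int, 0 ≤ j →
      pvExtend merged e k j
        = max j ((PySem.List.bisectRight (merged.map (fun p => p.1)) (e + k) : Int) - 1) := by
  obtain ⟨hc1, hc2, hc3⟩ := PySem.List.bisectRight_spec (merged.map (fun p => p.1)) (e + k) hst
  rw [List.length_map] at hc1
  suffices H : ∀ n (j : Int), ((merged.length : Int) - j).toNat = n → 0 ≤ j →
      pvExtend merged e k j
        = max j ((PySem.List.bisectRight (merged.map (fun p => p.1)) (e + k) : Int) - 1) by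
    intro j hj; exact H _ j rfl hj
  intro n
  induction n using Nat.strong_induction_on with
  | _ n ih =>
    intro j hn hj
    rw [pvExtend]
    split_ifs with h1 h2
    · have hidx : (j + 1).toNat < merged.length := by omega
      have hgd : PySem.List.pyGetD merged (j + 1) (0, 0) = merged[(j + 1).toNat] :=
        PySem.List.pyGetD_eq_getElem merged (0, 0) (by omega) (by exact_mod_cast h1)
      have hstart : (merged.map (fun p => p.1))[(j + 1).toNat]'(by simpa using hidx)
          = (merged[(j + 1).toNat]).1 := List.getElem_map ..
      have hlt : (j + 1).toNat < PySem.List.bisectRight (merged.map (fun p => p.1)) (e + k) := by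
        by_contra hge
        have := hc3 (j + 1).toNat (by simpa using hidx) (by omega)
        rw [hstart, ← hgd] at this
        omega
      rw [ih _ (by omega) (j + 1) rfl (by omega)]
      omega
    · have hidx : (j + 1).toNat < merged.length := by omega
      have hgd : PySem.List.pyGetD merged (j + 1) (0, 0) = merged[(j + 1).toNat] :=
        PySem.List.pyGetD_eq_getElem merged (0, 0) (by omega) (by exact_mod_cast h1)
      have hge : PySem.List.bisectRight (merged.map (fun p => p.1)) (e + k) ≤ (j + 1).toNat := by
        by_contra hlt
        have := hc2 (j + 1).toNat (by simpa using hidx) (by omega)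
        rw [List.getElem_map, ← hgd] at this
        omega
      omega
    · omega

-- the loop invariant coupling A's carried state with B's running best
lemma pvInvariant (merged : List (Int × Int)) (k : Int)
    (hst : (merged.map (fun p => p.1)).Pairwise (· ≤ ·)) :
    ∀ n : Nat, 1 ≤ n → n ≤ merged.length →
      (((PySem.List.pyRange 0 n 1).foldl (pvStepA merged k) (0, 1)).2
          = (PySem.List.pyRange 0 n 1).foldl
              (fun b i => pvStepB (merged.map (fun p => p.1)) k b
                (i, PySem.List.pyGetD merged i (0, 0))) 1)
        ∧ (n : Int) - 1 ≤ ((PySem.List.pyRange 0 n 1).foldl (pvStepA merged k) (0, 1)).1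
        ∧ ((PySem.List.pyRange 0 n 1).foldl (pvStepA merged k) (0, 1)).1 ≤ (merged.length : Int) - 1
        ∧ ((PySem.List.pyRange 0 n 1).foldl (pvStepA merged k) (0, 1)).1 - n + 2
            ≤ (PySem.List.pyRange 0 n 1).foldl
                (fun b i => pvStepB (merged.map (fun p => p.1)) k b
                  (i, PySem.List.pyGetD merged i (0, 0))) 1 := by
  intro n hn1
  induction n, hn1 using Nat.le_induction with
  | base =>
    intro hlen
    have hr : PySem.List.pyRange 0 ((1 : Nat) : Int) 1 = [0] := by decide
    obtain ⟨hc1, _, _⟩ := PySem.List.bisectRight_spec (merged.map (fun p => p.1))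
      ((PySem.List.pyGetD merged 0 (0, 0)).2 + k) hst
    rw [List.length_map] at hc1
    rw [hr]
    simp only [List.foldl_cons, List.foldl_nil, pvStepA, pvStepB]
    rw [pvExtend_eq merged hst _ k _ (by omega)]
    refine ⟨?_, ?_, ?_, ?_⟩ <;> split_ifs <;> omega
  | succ n hn ih =>
    intro hlen
    obtain ⟨h1, h2, h3, h4⟩ := ih (by omega)
    obtain ⟨hc1, _, _⟩ := PySem.List.bisectRight_spec (merged.map (fun p => p.1))
      ((PySem.List.pyGetD merged (n : Int) (0, 0)).2 + k) hst
    rw [List.length_map] at hc1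
    have hsplit : PySem.List.pyRange 0 ((n + 1 : Nat) : Int) 1
        = PySem.List.pyRange 0 (n : Int) 1 ++ [(n : Int)] := by
      push_cast
      exact PySem.List.pyRange_one_succ_right (by exact_mod_cast Nat.zero_le n)
    rw [hsplit]
    simp only [List.foldl_append, List.foldl_cons, List.foldl_nil]
    set stA := (PySem.List.pyRange 0 (n : Int) 1).foldl (pvStepA merged k) (0, 1) with hstA
    set bB := (PySem.List.pyRange 0 (n : Int) 1).foldl
        (fun b i => pvStepB (merged.map (fun p => p.1)) k b
          (i, PySem.List.pyGetD merged i (0, 0))) 1 with hbB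
    simp only [pvStepA, pvStepB]
    have h0 : (0 : Int) ≤ (if stA.1 < (n : Int) then (n : Int) else stA.1) := by
      split_ifs <;> omega
    rw [pvExtend_eq merged hst _ k _ h0]
    refine ⟨?_, ?_, ?_, ?_⟩ <;> · split_ifs <;> omega

-- ===== VERDICT (by name: the statement is the Claim_ definition above) =====
theorem minConnectedGroups_spec : Claim_equal_minConnectedGroups := by
  intro intervals k hdom hpre
  unfold Spec_minConnectedGroups
  simp only [minConnectedGroups, minConnectedGroups_alt]
  split_ifs with h
  · rfl
  · have hpos : 0 < (pvSortMerge intervals).length := by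
      rcases Nat.eq_zero_or_pos (pvSortMerge intervals).length with h0 | h0
      · exact absurd (by exact_mod_cast h0) h
      · exact h0
    have hst := pvStarts_sorted intervals hpre
    have hinv := pvInvariant (pvSortMerge intervals) k hst (pvSortMerge intervals).length
      (by omega) (le_refl _)
    rw [PySem.List.enumerate_eq_map_pyRange (pvSortMerge intervals) ((0 : Int), (0 : Int)),
      List.foldl_map]
    simp only [PySem.List.len_eq]
    rw [hinv.1]
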